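-- pv_equiv track=rewrite | github.com/samuelabera21/Samuel_AI_Tools_App | tools/geez_numbers_converter/converter.py | _arabic_to_geez_recursive
-- ===== SOURCE A (Python) =====
-- UNITS = {
--     1: "፩", 2: "፪", 3: "፫", 4: "፬", 5: "፭",
--     6: "፮", 7: "፯", 8: "፰", 9: "፱",
-- }
--
-- TENS = {
--     10: "፲", 20: "፳", 30: "፴", 40: "፵",
--     50: "፶", 60: "፷", 70: "፸", 80: "፹", 90: "፺",
-- }
--
-- HUNDRED = "፻"
--
-- TEN_THOUSAND = "፼"
--
-- def _arabic_to_geez_recursive(num):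
--     if num == 0:
--         return ""
--
--     result = ""
--
--     if num >= 10000:
--         ten_thousands = num // 10000
--         result += _arabic_to_geez_recursive(ten_thousands) + TEN_THOUSAND
--         num %= 10000
--
--     if num >= 100:
--         hundreds = num // 100
--         if hundreds > 1:
--             result += _arabic_to_geez_recursive(hundreds)
--         result += HUNDRED
--         num %= 100
--
--     if num >= 10:
--         tens = (num // 10) * 10
--         result += TENS[tens]
--         num %= 10
--
--     if num > 0:
--         result += UNITS[num]
--
--     return result
-- ===== SOURCE B (Python) =====
-- UNITS = {
--     1: "፩", 2: "፪", 3: "፫", 4: "፬", 5: "፭",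
--     6: "፮", 7: "፯", 8: "፰", 9: "፱",
-- }
--
-- TENS = {
--     10: "፲", 20: "፳", 30: "፴", 40: "፵",
--     50: "፶", 60: "፷", 70: "፸", 80: "፹", 90: "፺",
-- }
--
-- HUNDRED = "፻"
--
-- TEN_THOUSAND = "፼"
--
--
-- def _convert_group(g):
--     """Render one base-10000 digit of the numeral (empty for a zero group)."""
--     s = ""
--     h = g // 100
--     rem = g % 100
--     if h:
--         if h > 1:
--             s += TENS.get(h // 10 * 10, "") + UNITS.get(h % 10, "")
--         s += HUNDRED
--     t = rem // 10
--     u = rem % 10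
--     if t:
--         s += TENS[t * 10]
--     if u:
--         s += UNITS[u]
--     return s
--
--
-- def _arabic_to_geez_recursive(num):
--     # base-10000 positional render: extract digits, join groups with ፼
--     groups = []
--     while num > 0:
--         groups.append(num % 10000)
--         num //= 10000
--     return TEN_THOUSAND.join(_convert_group(g) for g in reversed(groups))
-- ===== Notes on version B (the rewrite author's own statement) =====
-- stated objective: alternative
-- what changed: Replaces A's recursion (which re-enters itself for the ten-thousands part and for the hundreds prefix) with an explicit base-10000 digit-extraction loop whose groups are rendered by a flat 0-9999 group renderer and joined with ፜.
import Mathlib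
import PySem

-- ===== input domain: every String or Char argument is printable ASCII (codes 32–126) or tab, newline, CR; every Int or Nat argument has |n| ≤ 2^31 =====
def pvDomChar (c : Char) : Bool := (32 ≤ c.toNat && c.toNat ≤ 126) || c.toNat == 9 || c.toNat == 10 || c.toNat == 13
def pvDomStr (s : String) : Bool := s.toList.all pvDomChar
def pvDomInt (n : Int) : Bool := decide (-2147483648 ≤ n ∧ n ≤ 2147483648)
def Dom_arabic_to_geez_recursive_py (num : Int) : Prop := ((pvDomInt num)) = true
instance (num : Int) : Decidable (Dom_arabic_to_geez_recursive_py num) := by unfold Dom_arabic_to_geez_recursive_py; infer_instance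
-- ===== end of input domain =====

-- B re-renders the number as base-10000 digits joined by ፼ (loop + join) instead of A's
-- recursion; same return value, objective: alternative decomposition (no speed claim).

-- ===== PORT A =====
-- UNITS[n] dict lookup (keys 1..9); returns "" off the keys — every A-side use is guarded so
-- only keys 1..9 are ever looked up (exact).
def unitsStr (n : Int) : String :=
  if n = 1 then "፩" else if n = 2 then "፪" else if n = 3 then "፫" else if n = 4 then "፬"
  else if n = 5 then "፭" else if n = 6 then "፮" else if n = 7 then "፯" else if n = 8 then "፰"
  else if n = 9 then "፱" else ""

-- TENS[n] dict lookup (keys 10..90 step 10); returns "" off the keys — A's use is guarded so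
-- only keys 10..90 are looked up (exact); B's .get(_, "") default is exactly this function.
def tensStr (n : Int) : String :=
  if n = 10 then "፲" else if n = 20 then "፳" else if n = 30 then "፴" else if n = 40 then "፵"
  else if n = 50 then "፶" else if n = 60 then "፷" else if n = 70 then "፸" else if n = 80 then "፹"
  else if n = 90 then "፺" else ""

-- A's body after the ten-thousands block (the hundreds/tens/units processing of `result`,`num`)
-- is transliterated as the helper `geezStages result num`; A and it are mutually recursive
-- exactly as A's Python recursion is.
mutual
  def arabic_to_geez_recursive_py (num : Int) : String :=
    if num = 0 then ""
    else if _h : 10000 ≤ num then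
      -- result += rec(num // 10000) + TEN_THOUSAND ; num %= 10000 ; then the remaining stages
      geezStages (arabic_to_geez_recursive_py (PySem.Int.floordiv num 10000) ++ "፼")
        (PySem.Int.mod num 10000)
    else
      geezStages "" num
  termination_by 2 * num.toNat + 1
  decreasing_by
    · rw [PySem.Int.floordiv_eq_ediv_of_pos (by omega)]; omega
    · rw [PySem.Int.mod_eq_emod_of_pos (by omega)]; omega
    · omega

  def geezStages (result : String) (num : Int) : String :=
    -- hundreds block: if num >= 100: hundreds = num // 100; (prefix if hundreds > 1); += ፻; num %= 100
    let result1 :=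
      if _h : 100 ≤ num then
        (if 1 < PySem.Int.floordiv num 100 then
          result ++ arabic_to_geez_recursive_py (PySem.Int.floordiv num 100)
        else result) ++ "፻"
      else result
    let num1 := if 100 ≤ num then PySem.Int.mod num 100 else num
    -- tens block
    let result2 := if 10 ≤ num1 then result1 ++ tensStr (PySem.Int.floordiv num1 10 * 10) else result1
    let num2 := if 10 ≤ num1 then PySem.Int.mod num1 10 else num1
    -- units block
    if 0 < num2 then result2 ++ unitsStr num2 else result2
  termination_by 2 * num.toNat
  decreasing_by
    rw [PySem.Int.floordiv_eq_ediv_of_pos (by omega)]; omega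
end

-- ===== PORT B =====
-- groups = []; while num > 0: groups.append(num % 10000); num //= 10000
def collectGroups (num : Int) : List Int :=
  if _h : 0 < num then
    PySem.Int.mod num 10000 :: collectGroups (PySem.Int.floordiv num 10000)
  else []
termination_by num.toNat
decreasing_by
  rw [PySem.Int.floordiv_eq_ediv_of_pos (by omega)]; omega

-- _convert_group(g): render one base-10000 digit (hundreds with the >1 prefix, tens, units)
def convertGroup (g : Int) : String :=
  let h := PySem.Int.floordiv g 100
  let rem := PySem.Int.mod g 100
  let s :=
    if h ≠ 0 then
      (if 1 < h then
        tensStr (PySem.Int.floordiv h 10 * 10) ++ unitsStr (PySem.Int.mod h 10)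
      else "") ++ "፻"
    else ""
  let t := PySem.Int.floordiv rem 10
  let u := PySem.Int.mod rem 10
  (s ++ (if t ≠ 0 then tensStr (t * 10) else "")) ++ (if u ≠ 0 then unitsStr u else "")

def arabic_to_geez_recursive_py_alt (num : Int) : String :=
  PySem.Str.join "፼" ((collectGroups num).reverse.map convertGroup)

-- ===== PRECONDITION & SPEC =====
def Spec_arabic_to_geez_recursive_py (num : Int) (out : String) : Prop := out = arabic_to_geez_recursive_py_alt num
instance (num : Int) (out : String) : Decidable (Spec_arabic_to_geez_recursive_py num out) := by unfold Spec_arabic_to_geez_recursive_py; infer_instance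

-- ===== CLAIM (what is proved, stated in full; the proofs are below) =====
def Claim_equal_arabic_to_geez_recursive_py : Prop := ∀ (num : Int), Dom_arabic_to_geez_recursive_py num → Spec_arabic_to_geez_recursive_py num (arabic_to_geez_recursive_py num)

-- ===== LEMMAS AND PROOFS =====

theorem fd10 (a : Int) : PySem.Int.floordiv a 10 = a / 10 := PySem.Int.floordiv_eq_ediv_of_pos (by norm_num)
theorem fd100 (a : Int) : PySem.Int.floordiv a 100 = a / 100 := PySem.Int.floordiv_eq_ediv_of_pos (by norm_num)
theorem fd10000 (a : Int) : PySem.Int.floordiv a 10000 = a / 10000 := PySem.Int.floordiv_eq_ediv_of_pos (by norm_num)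
theorem md10 (a : Int) : PySem.Int.mod a 10 = a % 10 := PySem.Int.mod_eq_emod_of_pos (by norm_num)
theorem md100 (a : Int) : PySem.Int.mod a 100 = a % 100 := PySem.Int.mod_eq_emod_of_pos (by norm_num)
theorem md10000 (a : Int) : PySem.Int.mod a 10000 = a % 10000 := PySem.Int.mod_eq_emod_of_pos (by norm_num)

theorem unitsStr_zero : unitsStr 0 = "" := by simp [unitsStr]
theorem tensStr_zero : tensStr 0 = "" := by simp [tensStr]

theorem join_cons_cons (sep a b : String) (l : List String) :
    PySem.Str.join sep (a :: b :: l) = a ++ sep ++ PySem.Str.join sep (b :: l) := by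
  apply String.toList_inj.mp
  simp [PySem.Str.join, PySem.Chars.join_cons_cons]

theorem join_singleton (sep a : String) : PySem.Str.join sep [a] = a := by
  apply String.toList_inj.mp
  simp [PySem.Str.join, PySem.Chars.join_singleton]

theorem join_append_last (sep y : String) (l : List String) (h : l ≠ []) :
    PySem.Str.join sep (l ++ [y]) = PySem.Str.join sep l ++ sep ++ y := by
  induction l with
  | nil => simp at h
  | cons a t ih =>
    cases t with
    | nil => rw [List.singleton_append, join_cons_cons, join_singleton, join_singleton]
    | cons b t2 =>
      calc PySem.Str.join sep ((a :: b :: t2) ++ [y])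
          = a ++ sep ++ PySem.Str.join sep ((b :: t2) ++ [y]) := join_cons_cons ..
        _ = a ++ sep ++ (PySem.Str.join sep (b :: t2) ++ sep ++ y) := by
              rw [ih (by simp)]
        _ = PySem.Str.join sep (a :: b :: t2) ++ sep ++ y := by
              rw [join_cons_cons]; simp [String.append_assoc]

-- geezStages prepends its `result` argument to what it produces from "".
theorem geezStages_shift (r : String) (n : Int) :
    geezStages r n = r ++ geezStages "" n := by
  rw [geezStages, geezStages]
  split_ifs <;> simp [String.append_assoc]

-- A on 0 < h < 100 is just the tens/units stages.
theorem A_tiny (h : Int) (h0 : 0 < h) (h1 : h < 100) :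
    arabic_to_geez_recursive_py h
      = tensStr (PySem.Int.floordiv h 10 * 10) ++ unitsStr (PySem.Int.mod h 10) := by
  rw [arabic_to_geez_recursive_py, if_neg (by omega), dif_neg (by omega), geezStages]
  simp only [fd10, md10, dif_neg (show ¬ (100 ≤ h) by omega),
    if_neg (show ¬ (100 ≤ h) by omega)]
  by_cases ht : 10 ≤ h
  · rw [if_pos ht, if_pos ht]
    by_cases hu : 0 < h % 10
    · rw [if_pos hu]; simp
    · rw [if_neg hu]
      have : h % 10 = 0 := by omega
      simp [this, unitsStr_zero]
  · rw [if_neg ht, if_neg ht, if_pos h0]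
    have hq : h / 10 = 0 := by omega
    have hm : h % 10 = h := by omega
    simp [hq, hm, tensStr_zero]

-- A's hundreds/tens/units stages on one base-10000 digit equal B's group renderer.
theorem A_group (g : Int) (h0 : 0 ≤ g) (h1 : g < 10000) :
    geezStages "" g = convertGroup g := by
  rw [geezStages, convertGroup]
  simp only [fd10, fd100, md10, md100]
  by_cases hh : 100 ≤ g
  · have hge : 1 ≤ g / 100 := by omega
    have hlt : g / 100 < 100 := by omega
    rw [dif_pos hh, if_pos hh, if_pos (show g / 100 ≠ 0 by omega)]
    have hpre : (if 1 < g / 100 then "" ++ arabic_to_geez_recursive_py (g / 100) else "")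
        = (if 1 < g / 100 then tensStr (g / 100 / 10 * 10) ++ unitsStr (g / 100 % 10) else "") := by
      by_cases h2 : 1 < g / 100
      · rw [if_pos h2, if_pos h2, A_tiny _ (by omega) hlt, fd10, md10]
        simp
      · rw [if_neg h2, if_neg h2]
    rw [hpre]
    by_cases ht : 10 ≤ g % 100
    · rw [if_pos ht, if_pos ht, if_pos (show (g % 100) / 10 ≠ 0 by omega)]
      by_cases hu : 0 < g % 100 % 10
      · rw [if_pos hu, if_pos (show g % 100 % 10 ≠ 0 by omega)]
      · rw [if_neg hu, if_neg (show ¬ (g % 100 % 10 ≠ 0) by omega)]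
        simp
    · rw [if_neg ht, if_neg ht, if_neg (show ¬ ((g % 100) / 10 ≠ 0) by omega)]
      by_cases hu : 0 < g % 100
      · rw [if_pos hu, if_pos (show g % 100 % 10 ≠ 0 by omega),
            show g % 100 % 10 = g % 100 by omega]
        try simp [String.append_assoc]
      · rw [if_neg hu, if_neg (show ¬ (g % 100 % 10 ≠ 0) by omega)]
        simp
  · have hq : g / 100 = 0 := by omega
    have hm : g % 100 = g := by omega
    rw [dif_neg hh, if_neg hh, if_neg (show ¬ (g / 100 ≠ 0) by omega), hm]
    by_cases ht : 10 ≤ g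
    · rw [if_pos ht, if_pos ht, if_pos (show g / 10 ≠ 0 by omega)]
      by_cases hu : 0 < g % 10
      · rw [if_pos hu, if_pos (show g % 10 ≠ 0 by omega)]
        try simp [String.append_assoc]
      · rw [if_neg hu, if_neg (show ¬ (g % 10 ≠ 0) by omega)]
        simp
    · have hq10 : g / 10 = 0 := by omega
      have hm10 : g % 10 = g := by omega
      rw [if_neg ht, if_neg ht, if_neg (show ¬ (g / 10 ≠ 0) by omega), hm10]
      by_cases hu : 0 < g
      · rw [if_pos hu, if_pos (show g ≠ 0 by omega)]
        simp
      · rw [if_neg hu, if_neg (show ¬ (g ≠ 0) by omega)]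
        simp

theorem collectGroups_ne_nil (n : Int) (h : 0 < n) : collectGroups n ≠ [] := by
  rw [collectGroups, dif_pos h]; simp

theorem geezStages_nonpos (n : Int) (h : n ≤ 0) : geezStages "" n = "" := by
  rw [geezStages]
  rw [dif_neg (by omega), if_neg (show ¬ (100 ≤ n) by omega),
      if_neg (show ¬ (10 ≤ n) by omega), if_neg (show ¬ (0 < n) by omega),
      if_neg (show ¬ (10 ≤ n) by omega)]

-- main equivalence, by strong induction on num.toNat
theorem A_eq_B (fuel : Nat) : ∀ num : Int, num.toNat ≤ fuel →
    arabic_to_geez_recursive_py num = arabic_to_geez_recursive_py_alt num := by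
  induction fuel with
  | zero =>
    intro num hn
    have hle : num ≤ 0 := by omega
    rw [arabic_to_geez_recursive_py, arabic_to_geez_recursive_py_alt, collectGroups,
        dif_neg (by omega)]
    by_cases h0 : num = 0
    · simp [h0, PySem.Str.join]
    · rw [if_neg h0, dif_neg (by omega), geezStages_nonpos _ hle]
      simp [PySem.Str.join]
  | succ k ih =>
    intro num hn
    by_cases hpos : 0 < num
    case neg => exact ih num (by omega)
    rw [arabic_to_geez_recursive_py, if_neg (by omega), arabic_to_geez_recursive_py_alt,
        collectGroups, dif_pos hpos, fd10000, md10000]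
    by_cases hbig : 10000 ≤ num
    · rw [dif_pos hbig]
      have hq : 0 < num / 10000 := by omega
      have hrec : arabic_to_geez_recursive_py (num / 10000)
          = arabic_to_geez_recursive_py_alt (num / 10000) := by
        apply ih; omega
      rw [geezStages_shift, A_group _ (by omega) (by omega), hrec,
          arabic_to_geez_recursive_py_alt]
      rw [List.reverse_cons, List.map_append, List.map_singleton]
      rw [join_append_last _ _ _ (by
        simp only [ne_eq, List.map_eq_nil_iff, List.reverse_eq_nil_iff]
        exact collectGroups_ne_nil _ hq)]
    · rw [dif_neg hbig]
      have hq : num / 10000 = 0 := by omega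
      have hm : num % 10000 = num := by omega
      rw [hq, hm, show collectGroups 0 = [] from by rw [collectGroups]; simp]
      rw [geezStages_shift, A_group _ (by omega) (by omega)]
      try simp [join_singleton]

-- ===== VERDICT (by name: the statement is the Claim_ definition above) =====
theorem arabic_to_geez_recursive_py_spec : Claim_equal_arabic_to_geez_recursive_py := by
  intro num _
  unfold Spec_arabic_to_geez_recursive_py
  exact A_eq_B num.toNat num (le_refl _)
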